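-- pv_equiv track=rewrite | github.com/frostburn/hewmp | src/hewmp/chord_parser.py | make_basic_chord
-- ===== SOURCE A (Python) =====
-- BASIC_CHORDS_ = {}
--
-- def make_basic_chord(base, arrow_tokens, ups_and_downs, chords=BASIC_CHORDS_):
--     inflection = "".join(arrow_tokens)
--     intervals, inflection_indices = chords[base]
--     chord = []
--     for i, interval in enumerate(intervals):
--         if i in inflection_indices:
--             chord.append(ups_and_downs + interval + inflection)
--         else:
--             chord.append(interval)
--     return chord
-- ===== SOURCE B (Python) =====
-- BASIC_CHORDS_ = {}
--
-- def _lookup_entry(base, chords):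
--     return chords[base]
--
-- def _inflect_at(chord, intervals, indices, ups_and_downs, inflection):
--     if not indices:
--         return chord
--     i = indices[0]
--     if 0 <= i < len(intervals):
--         chord[i] = ups_and_downs + intervals[i] + inflection
--     return _inflect_at(chord, intervals, indices[1:], ups_and_downs, inflection)
--
-- def make_basic_chord(base, arrow_tokens, ups_and_downs, chords=BASIC_CHORDS_):
--     intervals, inflection_indices = _lookup_entry(base, chords)
--     return _inflect_at(list(intervals), intervals, list(inflection_indices),
--                        ups_and_downs, "".join(arrow_tokens))
-- ===== Notes on version B (the rewrite author's own statement) =====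
-- stated objective: alternative
-- what changed: Instead of A's single loop over all intervals testing each position for membership in inflection_indices, B copies the interval list once and then recurses over inflection_indices only, overwriting each targeted slot (ignoring out-of-range indices exactly as A's membership test does).
import Mathlib
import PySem

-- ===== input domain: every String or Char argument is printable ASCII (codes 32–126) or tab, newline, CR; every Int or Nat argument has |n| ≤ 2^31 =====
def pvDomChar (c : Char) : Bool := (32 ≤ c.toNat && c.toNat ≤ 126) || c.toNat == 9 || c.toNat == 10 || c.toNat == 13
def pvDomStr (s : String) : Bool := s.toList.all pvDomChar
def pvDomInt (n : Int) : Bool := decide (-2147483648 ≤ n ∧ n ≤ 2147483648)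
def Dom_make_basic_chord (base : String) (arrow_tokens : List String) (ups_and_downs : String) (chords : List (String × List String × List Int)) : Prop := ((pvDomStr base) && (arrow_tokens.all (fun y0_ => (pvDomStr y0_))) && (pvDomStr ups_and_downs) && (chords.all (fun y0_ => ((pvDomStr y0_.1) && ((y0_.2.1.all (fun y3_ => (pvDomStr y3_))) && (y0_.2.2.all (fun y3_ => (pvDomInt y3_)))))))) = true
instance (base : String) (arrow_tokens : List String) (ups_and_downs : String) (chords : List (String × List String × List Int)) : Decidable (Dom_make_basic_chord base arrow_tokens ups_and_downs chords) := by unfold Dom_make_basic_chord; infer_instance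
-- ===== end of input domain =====

-- B replaces A's single scan over all intervals (membership test per position) by a copy of the
-- interval list followed by a recursion over inflection_indices only, overwriting targeted slots.

-- ===== PORT A =====
def make_basic_chord (base : String) (arrow_tokens : List String) (ups_and_downs : String) (chords : List (String × List String × List Int)) : List String :=
  let inflection := PySem.Str.join "" arrow_tokens
  match chords.find? (fun p => p.1 == base) with   -- chords[base]; KeyError (excluded by Pre_) if absent
  | none => []
  | some (_, intervals, inflection_indices) =>
    (PySem.List.enumerate intervals).foldl
      (fun chord p =>
        if p.1 ∈ inflection_indices then
          chord ++ [ups_and_downs ++ p.2 ++ inflection]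
        else
          chord ++ [p.2]) []

-- ===== PORT B =====
-- _lookup_entry: first-match dictionary lookup, written as structural recursion on the alist
def pvLookupEntry (base : String) : List (String × List String × List Int) → Option (List String × List Int)
  | [] => none
  | (k, v) :: rest => if k == base then some v else pvLookupEntry base rest

-- _inflect_at: recursion on the index list, overwriting chord[i] when i is in range
def pvInflectAt (chord intervals : List String) (indices : List Int) (u inf : String) : List String :=
  match indices with
  | [] => chord
  | i :: rest =>
    if 0 ≤ i ∧ i < (intervals.length : Int) then
      pvInflectAt (chord.set i.toNat (u ++ intervals.getD i.toNat "" ++ inf)) intervals rest u inf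
    else
      pvInflectAt chord intervals rest u inf

def make_basic_chord_alt (base : String) (arrow_tokens : List String) (ups_and_downs : String) (chords : List (String × List String × List Int)) : List String :=
  match pvLookupEntry base chords with
  | none => []
  | some (intervals, inflection_indices) =>
    pvInflectAt intervals intervals inflection_indices ups_and_downs (PySem.Str.join "" arrow_tokens)

-- ===== PRECONDITION & SPEC =====
-- Pre_ excludes exactly the inputs where Python A raises KeyError: base not a key of chords.
def Pre_make_basic_chord (base : String) (arrow_tokens : List String) (ups_and_downs : String) (chords : List (String × List String × List Int)) : Prop :=
  chords.any (fun p => p.1 == base) = true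
instance (base : String) (arrow_tokens : List String) (ups_and_downs : String) (chords : List (String × List String × List Int)) : Decidable (Pre_make_basic_chord base arrow_tokens ups_and_downs chords) := by unfold Pre_make_basic_chord; infer_instance

def pvWitness_make_basic_chord : String × List String × String × (List (String × List String × List Int)) :=
  ("M", ["^"], "v", [("M", (["P1", "M3", "P5"], [1, 2]))])

def Spec_make_basic_chord (base : String) (arrow_tokens : List String) (ups_and_downs : String) (chords : List (String × List String × List Int)) (out : List String) : Prop := out = make_basic_chord_alt base arrow_tokens ups_and_downs chords
instance (base : String) (arrow_tokens : List String) (ups_and_downs : String) (chords : List (String × List String × List Int)) (out : List String) : Decidable (Spec_make_basic_chord base arrow_tokens ups_and_downs chords out) := by unfold Spec_make_basic_chord; infer_instance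

-- ===== CLAIM (what is proved, stated in full; the proofs are below) =====
def Claim_equal_make_basic_chord : Prop := ∀ (base : String) (arrow_tokens : List String) (ups_and_downs : String) (chords : List (String × List String × List Int)), Dom_make_basic_chord base arrow_tokens ups_and_downs chords → Pre_make_basic_chord base arrow_tokens ups_and_downs chords → Spec_make_basic_chord base arrow_tokens ups_and_downs chords (make_basic_chord base arrow_tokens ups_and_downs chords)

-- ===== LEMMAS AND PROOFS =====

-- B's lookup helper agrees with find?.
theorem pvLookupEntry_eq (base : String) (chords : List (String × List String × List Int)) :
    pvLookupEntry base chords = (chords.find? (fun p => p.1 == base)).map (·.2) := by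
  induction chords with
  | nil => rfl
  | cons p rest ih =>
    by_cases h : p.1 == base <;> simp [pvLookupEntry, List.find?_cons, h, ih]

-- A's loop appends one element per enumerated interval: it is a map over the enumeration.
theorem pvA_foldl_map (idxs : List Int) (u inf : String) (l : List (Int × String)) (acc : List String) :
    l.foldl (fun chord p => if p.1 ∈ idxs then chord ++ [u ++ p.2 ++ inf] else chord ++ [p.2]) acc
      = acc ++ l.map (fun p => if p.1 ∈ idxs then u ++ p.2 ++ inf else p.2) := by
  induction l generalizing acc with
  | nil => simp
  | cons p rest ih => by_cases h : p.1 ∈ idxs <;> simp [h, ih]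

-- B's recursion: length is preserved and each final slot is the inflected value iff its index occurs.
theorem pvB_set_loop (intervals : List String) (u inf : String) (l : List Int) (acc : List String)
    (hc : acc.length = intervals.length) :
    (pvInflectAt acc intervals l u inf).length = intervals.length ∧
    ∀ j : Nat, j < intervals.length →
      ((pvInflectAt acc intervals l u inf)[j]?) =
        if (j : Int) ∈ l then some (u ++ intervals.getD j "" ++ inf) else (acc[j]?) := by
  induction l generalizing acc with
  | nil => exact ⟨hc, fun j hj => by simp [pvInflectAt]⟩
  | cons i rest ih =>
    have hstep : (if 0 ≤ i ∧ i < (intervals.length : Int) then acc.set i.toNat (u ++ intervals.getD i.toNat "" ++ inf) else acc).length = intervals.length := by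
      split <;> simp [hc]
    obtain ⟨hlen, helem⟩ := ih _ hstep
    have hunf : pvInflectAt acc intervals (i :: rest) u inf
        = pvInflectAt (if 0 ≤ i ∧ i < (intervals.length : Int) then acc.set i.toNat (u ++ intervals.getD i.toNat "" ++ inf) else acc) intervals rest u inf := by
      rw [pvInflectAt]; split <;> rfl
    refine ⟨by rw [hunf]; exact hlen, ?_⟩
    intro j hj
    rw [hunf, helem j hj]
    by_cases hmem : (j : Int) ∈ rest
    · simp [hmem]
    · by_cases hji : (j : Int) = i
      · subst hji
        have h0 : (0 : Int) ≤ (j : Int) := Int.natCast_nonneg j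
        have h1 : (j : Int) < (intervals.length : Int) := by exact_mod_cast hj
        simp [hmem, h0, h1, hc, hj]
      · have hnm : (j : Int) ∉ (i :: rest) := by
          intro h; rcases List.mem_cons.mp h with h | h
          · exact hji h
          · exact hmem h
        simp only [hnm, if_false, hmem, if_false]
        split
        · rename_i hg
          rw [List.getElem?_set]
          have : ¬ i.toNat = j := by
            intro h
            apply hji
            omega
          simp [this]
        · rfl

theorem make_basic_chord_spec : Claim_equal_make_basic_chord := by
  intro base arrow_tokens ups_and_downs chords _ _
  unfold Spec_make_basic_chord make_basic_chord make_basic_chord_alt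
  rw [pvLookupEntry_eq]
  cases hfind : chords.find? (fun p => p.1 == base) with
  | none => rfl
  | some entry =>
    obtain ⟨k, intervals, idxs⟩ := entry
    simp only [Option.map_some]
    rw [pvA_foldl_map]
    obtain ⟨hlen, helem⟩ := pvB_set_loop intervals ups_and_downs (PySem.Str.join "" arrow_tokens) idxs intervals rfl
    apply List.ext_getElem?
    intro j
    by_cases hj : j < intervals.length
    · rw [helem j hj, List.nil_append, List.getElem?_map, PySem.List.getElem?_enumerate,
        List.getElem?_eq_getElem hj]
      simp only [Option.map_some, zero_add]
      by_cases hm : ((j : Int)) ∈ idxs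
      · simp [hm, List.getD_eq_getElem?_getD, List.getElem?_eq_getElem hj]
      · simp [hm]
    · have hA : (List.map (fun p => if p.1 ∈ idxs then ups_and_downs ++ p.2 ++ PySem.Str.join "" arrow_tokens else p.2) (PySem.List.enumerate intervals))[j]? = none := by
        apply List.getElem?_eq_none
        simpa [PySem.List.length_enumerate] using Nat.le_of_not_lt hj
      have hB : (pvInflectAt intervals intervals idxs ups_and_downs (PySem.Str.join "" arrow_tokens))[j]? = none := by
        apply List.getElem?_eq_none
        rw [hlen]; exact Nat.le_of_not_lt hj
      simp only [List.nil_append] at hA ⊢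
      rw [hA, hB]
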